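-- pv_equiv track=rewrite | github.com/saw-projects/API-projects | API with Docker and MySQL/docker_app/main.py | invalid_content
-- ===== SOURCE A (Python) =====
-- def invalid_content(input, properties):
--     input_properties =[]
--     for i in input:
--         input_properties.append(i)
--     for property in properties:
--         if property not in input_properties:
--             if property != "review_text":
--                 return True
--     return False
-- ===== SOURCE B (Python) =====
-- def invalid_content(input, properties):
--     unmet = {}
--     for p in properties:
--         if p != "review_text":
--             unmet[p] = True
--     for k in input:
--         unmet.pop(k, None)
--     return len(unmet) > 0
-- ===== Notes on version B (the rewrite author's own statement) =====
-- stated objective: alternative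
-- what changed: Instead of scanning properties with an inner list-membership test and an early return, B builds a dict of required properties once, then iterates the input keys erasing each from the dict, and returns whether any entry remains - the inner scan disappears and the outer traversal is over input, not properties.
import Mathlib
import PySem

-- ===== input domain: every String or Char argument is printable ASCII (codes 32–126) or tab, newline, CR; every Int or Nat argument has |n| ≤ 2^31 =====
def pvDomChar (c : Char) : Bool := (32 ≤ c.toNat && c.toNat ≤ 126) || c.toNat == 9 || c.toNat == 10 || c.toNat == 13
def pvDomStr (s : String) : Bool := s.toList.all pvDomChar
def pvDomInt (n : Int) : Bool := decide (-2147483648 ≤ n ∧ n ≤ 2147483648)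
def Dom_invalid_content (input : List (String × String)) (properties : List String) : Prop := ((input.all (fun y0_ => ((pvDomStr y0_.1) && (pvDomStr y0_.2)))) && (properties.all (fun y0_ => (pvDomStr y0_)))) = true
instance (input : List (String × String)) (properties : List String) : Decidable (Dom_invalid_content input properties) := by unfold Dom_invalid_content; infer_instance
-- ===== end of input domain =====

-- ===== PORT A =====
-- B replaces A's properties-scan (inner list membership, early return) by a dict-marking
-- algorithm: mark each required property, erase marks while iterating input, test the residual.
-- A's early-return scan over `properties` (the Python's `for property in properties: …`)
def invalidLoop (input_properties : List String) : List String → Bool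
  | [] => false
  | p :: ps =>
      if ¬ input_properties.contains p then
        if p ≠ "review_text" then true else invalidLoop input_properties ps
      else invalidLoop input_properties ps

-- `for i in input: input_properties.append(i)` — iterating a dict yields its keys, in order
def invalid_content (input : List (String × String)) (properties : List String) : Bool :=
  let input_properties := input.foldl (fun acc i => acc ++ [i.1]) []
  invalidLoop input_properties properties

-- ===== PORT B =====
-- unmet = {}; for p in properties: if p != "review_text": unmet[p] = True
-- for k in input: unmet.pop(k, None)
-- return len(unmet) > 0
def invalid_content_alt (input : List (String × String)) (properties : List String) : Bool :=
  let unmet : PySem.Dict String Bool :=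
    properties.foldl (fun d p => if p ≠ "review_text" then d.insert p true else d)
      PySem.Dict.empty
  let unmet := input.foldl (fun d k => d.erase k.1) unmet
  decide (0 < unmet.size)

-- ===== PRECONDITION & SPEC =====
def Spec_invalid_content (input : List (String × String)) (properties : List String) (out : Bool) : Prop := out = invalid_content_alt input properties
instance (input : List (String × String)) (properties : List String) (out : Bool) : Decidable (Spec_invalid_content input properties out) := by unfold Spec_invalid_content; infer_instance

-- ===== CLAIM (what is proved, stated in full; the proofs are below) =====
def Claim_equal_invalid_content : Prop := ∀ (input : List (String × String)) (properties : List String), Dom_invalid_content input properties → Spec_invalid_content input properties (invalid_content input properties)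

-- ===== LEMMAS AND PROOFS =====

theorem foldl_append_fst (l : List (String × String)) (acc : List String) :
    l.foldl (fun a i => a ++ [i.1]) acc = acc ++ l.map Prod.fst := by
  induction l generalizing acc with
  | nil => simp
  | cons x xs ih => simp [List.foldl, ih]

theorem invalidLoop_eq_any (K : List String) (ps : List String) :
    invalidLoop K ps = ps.any (fun p => !(K.contains p) && p != "review_text") := by
  induction ps with
  | nil => rfl
  | cons p ps ih =>
      by_cases hK : p ∈ K <;> by_cases hr : p = "review_text" <;>
        simp [invalidLoop, hK, hr, ih]

-- the erase loop over `input` filters every marked key that occurs among input's keys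
theorem items_foldl_erase (l : List (String × String)) (d : PySem.Dict String Bool) :
    (l.foldl (fun d k => d.erase k.1) d).items
      = d.items.filter (fun p => !((l.map Prod.fst).contains p.1)) := by
  induction l generalizing d with
  | nil => simp
  | cons x xs ih =>
      rw [List.foldl_cons, ih]
      show List.filter _ (List.filter _ d.items) = _
      rw [List.filter_filter]
      congr 1
      funext p
      by_cases h : p.1 = x.1 <;> simp [h, Bool.and_comm]

-- keys marked by the first loop: exactly the required properties
theorem mem_keys_mark (ps : List String) (d : PySem.Dict String Bool) (x : String) :
    x ∈ (ps.foldl (fun d p => if p ≠ "review_text" then d.insert p true else d) d).keys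
      ↔ x ∈ d.keys ∨ (x ∈ ps ∧ x ≠ "review_text") := by
  induction ps generalizing d with
  | nil => simp
  | cons p ps ih =>
      by_cases hr : p = "review_text"
      · subst hr
        have hstep : (if ("review_text" : String) ≠ "review_text"
            then d.insert "review_text" true else d) = d := by simp
        rw [List.foldl_cons, hstep, ih]
        constructor
        · rintro (h | h)
          · exact Or.inl h
          · exact Or.inr ⟨List.mem_cons_of_mem _ h.1, h.2⟩
        · rintro (h | ⟨hm, hne⟩)
          · exact Or.inl h
          · rcases List.mem_cons.mp hm with h | h
            · exact absurd h hne
            · exact Or.inr ⟨h, hne⟩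
      · rw [List.foldl_cons, if_pos hr, ih]
        simp only [PySem.Dict.mem_keys_insert]
        constructor
        · rintro ((h | h) | ⟨hm, hne⟩)
          · exact Or.inr ⟨by simp [h], by simpa [h] using hr⟩
          · exact Or.inl h
          · exact Or.inr ⟨List.mem_cons_of_mem _ hm, hne⟩
        · rintro (h | ⟨hm, hne⟩)
          · exact Or.inl (Or.inr h)
          · rcases List.mem_cons.mp hm with h | h
            · exact Or.inl (Or.inl h)
            · exact Or.inr ⟨h, hne⟩

theorem alt_eq_any (input : List (String × String)) (properties : List String) :
    invalid_content_alt input properties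
      = properties.any (fun p => !((input.map Prod.fst).contains p) && p != "review_text") := by
  rw [Bool.eq_iff_iff]
  simp only [invalid_content_alt, PySem.Dict.size, decide_eq_true_iff,
    List.length_pos_iff, ← List.isEmpty_eq_false_iff, List.isEmpty_eq_false_iff_exists_mem,
    items_foldl_erase, List.mem_filter, List.any_eq_true, Bool.and_eq_true,
    Bool.not_eq_true', bne_iff_ne]
  constructor
  · rintro ⟨q, hq, hnk⟩
    have hk : q.1 ∈ (properties.foldl
        (fun d p => if p ≠ "review_text" then d.insert p true else d)
        PySem.Dict.empty).keys := PySem.Dict.mem_keys_of_mem_items _ hq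
    rw [mem_keys_mark] at hk
    rcases hk with h | ⟨hm, hne⟩
    · simp [PySem.Dict.keys_empty] at h
    · exact ⟨q.1, hm, by simpa using hnk, hne⟩
  · rintro ⟨x, hm, hnk, hne⟩
    have hk : x ∈ (properties.foldl
        (fun d p => if p ≠ "review_text" then d.insert p true else d)
        PySem.Dict.empty).keys := by
      rw [mem_keys_mark]; exact Or.inr ⟨hm, hne⟩
    rcases List.mem_map.mp hk with ⟨q, hq, hq1⟩
    exact ⟨q, hq, by simpa [hq1] using hnk⟩

-- ===== VERDICT (by name: the statement is the Claim_ definition above) =====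
theorem invalid_content_spec : Claim_equal_invalid_content := by
  intro input properties _
  show invalid_content input properties = invalid_content_alt input properties
  rw [invalid_content, foldl_append_fst, invalidLoop_eq_any, alt_eq_any]
  simp
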